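-- pv_equiv track=rewrite | github.com/discopop-project/discopop | reduction/reduction_pass2.py | get_enclosed_str
-- ===== SOURCE A (Python) =====
-- def get_enclosed_str(data):
--     num_open_brackets = 1
--     enclosed_str = ''
--     j = None
--     for i in range(0, len(data)):
--         if data[i] == '[':
--             num_open_brackets = num_open_brackets + 1
--         elif data[i] == ']':
--             num_open_brackets = num_open_brackets - 1
--             if num_open_brackets == 0:
--                 enclosed_str = data[0:i]
--                 j = i
--                 break
--
--     if data[j + 1] == '[':
--         enclosed_str = enclosed_str + '][' + get_enclosed_str(data[(j + 2):len(data)])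
--
--     return enclosed_str
-- ===== SOURCE B (Python) =====
-- def get_enclosed_str(data):
--     # Single forward scan with a cumulative bracket counter: the answer is always
--     # a plain prefix data[:i], where i is the first position at which the counter
--     # (started at 1) has returned to zero and the following character is not '['.
--     depth = 1
--     n = len(data)
--     for i in range(n):
--         c = data[i]
--         if c == '[':
--             depth += 1
--         elif c == ']':
--             depth -= 1
--             if depth == 0:
--                 if i + 1 < n and data[i + 1] == '[':
--                     continue
--                 return data[:i]
--     raise ValueError("no enclosed substring")
-- ===== Notes on version B (the rewrite author's own statement) =====
-- stated objective: alternative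
-- what changed: A recursively finds each matching ']' and concatenates slice + '][' + recursive result; B makes one linear scan with a cumulative bracket counter and returns a single prefix slice data[:i] at the first counter-zero position not followed by '['.
-- outside the precondition, e.g. on get_enclosed_str('['): A raises TypeError, B raises ValueError; on get_enclosed_str(']'): A raises IndexError, B returns ''; on get_enclosed_str(']['): A raises TypeError, B raises ValueError
import Mathlib
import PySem

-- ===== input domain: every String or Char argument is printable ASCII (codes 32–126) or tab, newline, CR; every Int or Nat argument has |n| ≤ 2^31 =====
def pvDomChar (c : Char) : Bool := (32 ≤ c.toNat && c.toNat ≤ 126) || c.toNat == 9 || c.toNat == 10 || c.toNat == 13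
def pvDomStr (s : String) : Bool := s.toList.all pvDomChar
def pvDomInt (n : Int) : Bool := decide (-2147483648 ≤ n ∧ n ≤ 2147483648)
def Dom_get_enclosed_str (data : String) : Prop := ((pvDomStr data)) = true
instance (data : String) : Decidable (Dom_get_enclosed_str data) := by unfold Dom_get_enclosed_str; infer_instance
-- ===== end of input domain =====

-- B replaces A's recursive slice-and-concatenate construction by one linear scan with a
-- cumulative bracket counter, returning a single prefix slice (objective: alternative).

-- ===== PORT A =====
-- A's for-loop: scan with counter `num`, return the index of the ']' that zeroes it
def pvAScan : List Char → Int → Option Nat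
  | [], _ => none
  | c :: rest, num =>
    if c = '[' then (pvAScan rest (num + 1)).map (· + 1)
    else if c = ']' then
      if num - 1 = 0 then some 0 else (pvAScan rest (num - 1)).map (· + 1)
    else (pvAScan rest num).map (· + 1)

-- A's body on the char list: enclosed = data[0:j]; if data[j+1]=='[' append '][' and recurse
-- on data[j+2:].  Where Python A raises (no match: TypeError; j+1 = len: IndexError) this
-- returns a junk value ([] / take j); those inputs are excluded by Pre_get_enclosed_str.
def pvARec (l : List Char) : List Char :=
  match _h : pvAScan l 1 with
  | none => []
  | some j =>
    if h2 : l[j + 1]? = some '[' then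
      l.take j ++ [']', '['] ++ pvARec (l.drop (j + 2))
    else l.take j
termination_by l.length
decreasing_by
  have hj : j + 1 < l.length := (List.getElem?_eq_some_iff.mp h2).1
  simp only [List.length_drop]
  omega

def get_enclosed_str (data : String) : String := String.ofList (pvARec data.toList)

-- ===== PORT B =====
-- B's single scan: at a zero of the counter, continue when the next char is '[', else stop
def pvBScan : List Char → Int → Option Nat
  | [], _ => none
  | c :: rest, depth =>
    if c = '[' then (pvBScan rest (depth + 1)).map (· + 1)
    else if c = ']' then
      if depth - 1 = 0 then
        if rest.head? = some '[' then (pvBScan rest 0).map (· + 1) else some 0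
      else (pvBScan rest (depth - 1)).map (· + 1)
    else (pvBScan rest depth).map (· + 1)

-- none = Python B raises ValueError (outside Pre_get_enclosed_str)
def get_enclosed_str_alt (data : String) : String :=
  match pvBScan data.toList 1 with
  | some s => String.ofList (data.toList.take s)
  | none => ""

-- ===== PRECONDITION & SPEC =====
def pvCnt (l : List Char) : Int := (l.count '[' : Int) - (l.count ']' : Int)

-- exactly the inputs on which Python A returns: some prefix zeroes the bracket counter
-- (started at 1) at a position k < len whose character is not '['; on all other inputs
-- A raises (TypeError when no prefix zeroes the counter, IndexError when only k = len does)
def Pre_get_enclosed_str (data : String) : Prop :=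
  ∃ k, k < data.toList.length ∧ 1 + pvCnt (data.toList.take k) = 0 ∧ data.toList[k]? ≠ some '['
instance (data : String) : Decidable (Pre_get_enclosed_str data) := by
  unfold Pre_get_enclosed_str; infer_instance

def pvWitness_get_enclosed_str : String := "]x"


def Spec_get_enclosed_str (data : String) (out : String) : Prop := out = get_enclosed_str_alt data
instance (data : String) (out : String) : Decidable (Spec_get_enclosed_str data out) := by
  unfold Spec_get_enclosed_str; infer_instance

-- ===== CLAIM (what is proved, stated in full; the proofs are below) =====
def Claim_equal_get_enclosed_str : Prop := ∀ (data : String), Dom_get_enclosed_str data → Pre_get_enclosed_str data → Spec_get_enclosed_str data (get_enclosed_str data)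

-- ===== LEMMAS AND PROOFS =====

lemma pvAScan_cons (c : Char) (rest : List Char) (num : Int) :
    pvAScan (c :: rest) num =
      (if c = '[' then (pvAScan rest (num + 1)).map (· + 1)
       else if c = ']' then
         if num - 1 = 0 then some 0 else (pvAScan rest (num - 1)).map (· + 1)
       else (pvAScan rest num).map (· + 1)) := rfl

lemma pvBScan_cons (c : Char) (rest : List Char) (depth : Int) :
    pvBScan (c :: rest) depth =
      (if c = '[' then (pvBScan rest (depth + 1)).map (· + 1)
       else if c = ']' then
         if depth - 1 = 0 then
           if rest.head? = some '[' then (pvBScan rest 0).map (· + 1) else some 0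
         else (pvBScan rest (depth - 1)).map (· + 1)
       else (pvBScan rest depth).map (· + 1)) := rfl

-- B's scan expressed through A's scan: past the ']' that A finds, B either stops or restarts
lemma pvBScan_of_aScan : ∀ (l : List Char) (num : Int) (j : Nat), pvAScan l num = some j →
    pvBScan l num =
      if l[j + 1]? = some '[' then (pvBScan (l.drop (j + 2)) 1).map (· + (j + 2)) else some j := by
  intro l
  induction l with
  | nil => intro num j h; simp [pvAScan] at h
  | cons c rest ih =>
    intro num j h
    rw [pvAScan_cons] at h
    rw [pvBScan_cons]
    by_cases hc : c = '['
    · rw [if_pos hc] at h ⊢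
      obtain ⟨j', hj', rfl⟩ := Option.map_eq_some_iff.mp h
      rw [ih (num + 1) j' hj']
      have e1 : (c :: rest)[j' + 1 + 1]? = rest[j' + 1]? := List.getElem?_cons_succ
      have e2 : j' + 1 + 2 = (j' + 2) + 1 := by omega
      rw [e1, e2, List.drop_succ_cons]
      by_cases hg : rest[j' + 1]? = some '['
      · rw [if_pos hg, if_pos hg, Option.map_map]
        congr 1
      · rw [if_neg hg, if_neg hg]; rfl
    · rw [if_neg hc] at h ⊢
      by_cases hc2 : c = ']'
      · rw [if_pos hc2] at h ⊢
        by_cases h1 : num - 1 = 0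
        · rw [if_pos h1] at h ⊢
          obtain rfl : j = 0 := by simpa using h.symm
          by_cases hg : rest.head? = some '['
          · rw [if_pos hg]
            cases rest with
            | nil => simp at hg
            | cons d rest' =>
              obtain rfl : d = '[' := by simpa using hg
              rw [if_pos (by simp)]
              have hD : (c :: '[' :: rest').drop (0 + 2) = rest' := rfl
              rw [hD, pvBScan_cons, if_pos rfl, Option.map_map]
              congr 1
          · rw [if_neg hg, if_neg (by
              cases rest with
              | nil => simp
              | cons d rest' => simpa using hg)]
        · rw [if_neg h1] at h ⊢
          obtain ⟨j', hj', rfl⟩ := Option.map_eq_some_iff.mp h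
          rw [ih (num - 1) j' hj']
          have e1 : (c :: rest)[j' + 1 + 1]? = rest[j' + 1]? := List.getElem?_cons_succ
          have e2 : j' + 1 + 2 = (j' + 2) + 1 := by omega
          rw [e1, e2, List.drop_succ_cons]
          by_cases hg : rest[j' + 1]? = some '['
          · rw [if_pos hg, if_pos hg, Option.map_map]
            congr 1
          · rw [if_neg hg, if_neg hg]; rfl
      · rw [if_neg hc2] at h ⊢
        obtain ⟨j', hj', rfl⟩ := Option.map_eq_some_iff.mp h
        rw [ih num j' hj']
        have e1 : (c :: rest)[j' + 1 + 1]? = rest[j' + 1]? := List.getElem?_cons_succ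
        have e2 : j' + 1 + 2 = (j' + 2) + 1 := by omega
        rw [e1, e2, List.drop_succ_cons]
        by_cases hg : rest[j' + 1]? = some '['
        · rw [if_pos hg, if_pos hg, Option.map_map]
          congr 1
        · rw [if_neg hg, if_neg hg]; rfl

lemma pvAScan_mem : ∀ (l : List Char) (num : Int) (j : Nat),
    pvAScan l num = some j → l[j]? = some ']' := by
  intro l
  induction l with
  | nil => intro num j h; simp [pvAScan] at h
  | cons c rest ih =>
    intro num j h
    rw [pvAScan_cons] at h
    by_cases hc : c = '['
    · rw [if_pos hc] at h
      obtain ⟨j', hj', rfl⟩ := Option.map_eq_some_iff.mp h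
      simpa [List.getElem?_cons_succ] using ih (num + 1) j' hj'
    · rw [if_neg hc] at h
      by_cases hc2 : c = ']'
      · rw [if_pos hc2] at h
        by_cases h1 : num - 1 = 0
        · rw [if_pos h1] at h
          obtain rfl : j = 0 := by simpa using h.symm
          simp [hc2]
        · rw [if_neg h1] at h
          obtain ⟨j', hj', rfl⟩ := Option.map_eq_some_iff.mp h
          simpa [List.getElem?_cons_succ] using ih (num - 1) j' hj'
      · rw [if_neg hc2] at h
        obtain ⟨j', hj', rfl⟩ := Option.map_eq_some_iff.mp h
        simpa [List.getElem?_cons_succ] using ih num j' hj'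

lemma pvCnt_cons (c : Char) (t : List Char) :
    pvCnt (c :: t) = pvCnt t + (if c = '[' then 1 else 0) - (if c = ']' then 1 else 0) := by
  simp only [pvCnt, List.count_cons]
  split_ifs <;> simp_all <;> omega

lemma pvShift (c : Char) (rest : List Char) (j : Nat)
    (H : ∃ k2, k2 < (rest.drop (j + 2)).length ∧ 1 + pvCnt ((rest.drop (j + 2)).take k2) = 0 ∧
      (rest.drop (j + 2))[k2]? ≠ some '[') :
    ∃ k2, k2 < ((c :: rest).drop (j + 1 + 2)).length ∧
      1 + pvCnt (((c :: rest).drop (j + 1 + 2)).take k2) = 0 ∧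
      ((c :: rest).drop (j + 1 + 2))[k2]? ≠ some '[' := by
  have e : j + 1 + 2 = (j + 2) + 1 := by omega
  rw [e, List.drop_succ_cons]; exact H

-- the precondition drives A's scan to a successful stop, and propagates to the tail
lemma pvE : ∀ (l : List Char) (num : Int), 1 ≤ num →
    (∃ k, k < l.length ∧ num + pvCnt (l.take k) = 0 ∧ l[k]? ≠ some '[') →
    ∃ j, pvAScan l num = some j ∧ j + 1 < l.length ∧
      (l[j + 1]? = some '[' →
        ∃ k2, k2 < (l.drop (j + 2)).length ∧ 1 + pvCnt ((l.drop (j + 2)).take k2) = 0 ∧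
          (l.drop (j + 2))[k2]? ≠ some '[') := by
  intro l
  induction l with
  | nil =>
    intro num _ H
    obtain ⟨k, hk, _, _⟩ := H
    simp at hk
  | cons c rest ih =>
    intro num hnum H
    obtain ⟨k, hk, hbal, hne⟩ := H
    by_cases hc : c = '['
    · subst hc
      cases k with
      | zero => simp [pvCnt] at hbal; omega
      | succ k' =>
        have hbal' : (num + 1) + pvCnt (rest.take k') = 0 := by
          rw [List.take_succ_cons, pvCnt_cons] at hbal
          simp at hbal; omega
        obtain ⟨j, hj, hjlt, hrec⟩ := ih (num + 1) (by omega)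
          ⟨k', by simpa using hk, hbal', by simpa using hne⟩
        refine ⟨j + 1, ?_, by simpa using Nat.succ_lt_succ hjlt, ?_⟩
        · rw [pvAScan_cons, if_pos rfl, hj]; rfl
        · intro hnext
          exact pvShift _ _ _ (hrec (by simpa using hnext))
    · by_cases hc2 : c = ']'
      · subst hc2
        by_cases h1 : num = 1
        · subst h1
          have hk0 : k ≠ 0 := by rintro rfl; simp [pvCnt] at hbal
          refine ⟨0, ?_, by simp at hk ⊢; omega, ?_⟩
          · rw [pvAScan_cons, if_neg (by decide), if_pos rfl, if_pos (by norm_num)]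
          · intro hnext
            cases rest with
            | nil => simp at hnext
            | cons d rest'' =>
              obtain rfl : d = '[' := by simpa using hnext
              have hk1 : k ≠ 1 := by rintro rfl; exact hne (by simp)
              obtain ⟨k2, rfl⟩ : ∃ k2, k = 2 + k2 := by
                refine ⟨k - 2, ?_⟩; omega
              have hD : ((']' :: '[' :: rest'').drop (0 + 2)) = rest'' := rfl
              rw [hD]
              refine ⟨k2, by simp at hk ⊢; omega, ?_, ?_⟩
              · have e : 2 + k2 = (k2 + 1) + 1 := by omega
                rw [e, List.take_succ_cons, List.take_succ_cons, pvCnt_cons, pvCnt_cons] at hbal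
                simp at hbal
                omega
              · have e : 2 + k2 = k2 + 1 + 1 := by omega
                rw [e] at hne
                simpa using hne
        · have hnum2 : (2 : Int) ≤ num := by omega
          cases k with
          | zero => simp [pvCnt] at hbal; omega
          | succ k' =>
            have hbal' : (num - 1) + pvCnt (rest.take k') = 0 := by
              rw [List.take_succ_cons, pvCnt_cons] at hbal
              simp at hbal; omega
            obtain ⟨j, hj, hjlt, hrec⟩ := ih (num - 1) (by omega)
              ⟨k', by simpa using hk, hbal', by simpa using hne⟩
            refine ⟨j + 1, ?_, by simpa using Nat.succ_lt_succ hjlt, ?_⟩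
            · rw [pvAScan_cons, if_neg (by decide), if_pos rfl, if_neg (by omega), hj]; rfl
            · intro hnext
              exact pvShift _ _ _ (hrec (by simpa using hnext))
      · cases k with
        | zero => simp [pvCnt] at hbal; omega
        | succ k' =>
          have hbal' : num + pvCnt (rest.take k') = 0 := by
            rw [List.take_succ_cons, pvCnt_cons, if_neg hc, if_neg hc2] at hbal
            omega
          obtain ⟨j, hj, hjlt, hrec⟩ := ih num hnum
            ⟨k', by simpa using hk, hbal', by simpa using hne⟩
          refine ⟨j + 1, ?_, by simpa using Nat.succ_lt_succ hjlt, ?_⟩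
          · rw [pvAScan_cons, if_neg hc, if_neg hc2, hj]; rfl
          · intro hnext
            exact pvShift _ _ _ (hrec (by simpa using hnext))

-- main induction (on a length bound): under the precondition B's scan succeeds at s and
-- A's recursive slice-and-concatenate result is exactly the prefix of length s
lemma pvMain : ∀ (n : Nat) (l : List Char), l.length ≤ n →
    (∃ k, k < l.length ∧ 1 + pvCnt (l.take k) = 0 ∧ l[k]? ≠ some '[') →
    ∃ s, pvBScan l 1 = some s ∧ pvARec l = l.take s := by
  intro n
  induction n with
  | zero =>
    intro l hlen H
    obtain ⟨k, hk, _, _⟩ := H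
    omega
  | succ n ih =>
    intro l hlen H
    obtain ⟨j, hj, hjlt, hrec⟩ := pvE l 1 le_rfl H
    have hBA := pvBScan_of_aScan l 1 j hj
    have hmem := pvAScan_mem l 1 j hj
    by_cases hnext : l[j + 1]? = some '['
    · rw [if_pos hnext] at hBA
      obtain ⟨s', hb', ha'⟩ := ih (l.drop (j + 2))
        (by simp only [List.length_drop]; omega) (hrec hnext)
      refine ⟨s' + (j + 2), by rw [hBA, hb']; rfl, ?_⟩
      have hA : pvARec l = l.take j ++ [']', '['] ++ pvARec (l.drop (j + 2)) := by
        rw [pvARec.eq_def]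
        split
        · next heq => simp [hj] at heq
        · next j'' heq =>
          rw [hj] at heq
          injection heq with e
          subst e
          rw [dif_pos hnext]
      rw [hA, ha']
      have ht2 : l.take (j + 2) = l.take j ++ [']', '['] := by
        have e : j + 2 = (j + 1) + 1 := rfl
        rw [e, List.take_add_one, List.take_add_one, hmem, hnext]
        simp
      have e2 : s' + (j + 2) = (j + 2) + s' := by omega
      rw [e2, List.take_add, ht2]
    · rw [if_neg hnext] at hBA
      refine ⟨j, hBA, ?_⟩
      rw [pvARec.eq_def]
      split
      · next heq => simp [hj] at heq
      · next j'' heq =>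
        rw [hj] at heq
        injection heq with e
        subst e
        rw [dif_neg hnext]

-- ===== VERDICT (by name: the statement is the Claim_ definition above) =====
theorem get_enclosed_str_spec : Claim_equal_get_enclosed_str := by
  intro data _ hpre
  unfold Spec_get_enclosed_str
  obtain ⟨s, hb, ha⟩ := pvMain data.toList.length data.toList le_rfl hpre
  unfold get_enclosed_str get_enclosed_str_alt
  rw [ha, hb]
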